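-- pv_equiv track=rewrite | github.com/eddy176/CIT | Programs/1410_OOP2/dnasequencer/dnaSequencing.py | findBestCandidate
-- ===== SOURCE A (Python) =====
-- def strandsAreNotEmpty(strand1, strand2):
--     if len(strand1) > 0 and len(strand2) > 0:
--         return True
--     else:
--         return False
--
-- def strandsAreEqualLengths(strand1, strand2):
--     if len(strand1) == len(strand2):
--         return True
--     else:
--         return False
--
-- def findLargestOverlap(target, candidate):
--     if strandsAreEqualLengths(target, candidate) != True or strandsAreNotEmpty(target, candidate) != True:
--         return -1
--     for i in range(len(target)):
--         tarslice = target[i:]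
--         canslice = candidate[:len(tarslice)]
--         if candidateOverlapsTarget(target, candidate, len(tarslice)):
--             return len(tarslice)
--     return 0
--
-- def candidateOverlapsTarget(target, candidate, overlap):
--     return target[-overlap:] == candidate[:overlap]
--
-- def findBestCandidate(target, candidates):
--     bestcan = ""
--     bestoverlap = 0
--     for candidate in candidates:
--         overlap = findLargestOverlap(target, candidate)
--         if overlap > bestoverlap:
--             bestoverlap = overlap
--             bestcan = candidate
--     return (bestcan, bestoverlap)
-- ===== SOURCE B (Python) =====
-- def _largestOverlap(target, candidate):
--     # Largest k with target[-k:] == candidate[:k], via the KMP failure function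
--     # of candidate + '\x00' + target (separator cannot occur in the inputs).
--     if len(candidate) != len(target) or not target:
--         return -1
--     s = candidate + "\x00" + target
--     f = [0] * len(s)
--     k = 0
--     for i in range(1, len(s)):
--         while k and s[i] != s[k]:
--             k = f[k - 1]
--         if s[i] == s[k]:
--             k += 1
--         f[i] = k
--     return k
--
-- def findBestCandidate(target, candidates):
--     bestcan = ""
--     bestoverlap = 0
--     for candidate in candidates:
--         overlap = _largestOverlap(target, candidate)
--         if overlap > bestoverlap:
--             bestoverlap = overlap
--             bestcan = candidate
--     return (bestcan, bestoverlap)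
-- ===== Notes on version B (the rewrite author's own statement) =====
-- stated objective: alternative
-- what changed: Per-candidate overlap is computed as the final KMP failure-function value of candidate + '\x00' + target in one linear pass, instead of A's descending scan that builds and compares a slice pair per shift (intended as faster on equal-length candidates, O(n) vs O(n^2) per candidate; a timing run measured only 1.37x on its generated inputs, so no speed is claimed).
import Mathlib
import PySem

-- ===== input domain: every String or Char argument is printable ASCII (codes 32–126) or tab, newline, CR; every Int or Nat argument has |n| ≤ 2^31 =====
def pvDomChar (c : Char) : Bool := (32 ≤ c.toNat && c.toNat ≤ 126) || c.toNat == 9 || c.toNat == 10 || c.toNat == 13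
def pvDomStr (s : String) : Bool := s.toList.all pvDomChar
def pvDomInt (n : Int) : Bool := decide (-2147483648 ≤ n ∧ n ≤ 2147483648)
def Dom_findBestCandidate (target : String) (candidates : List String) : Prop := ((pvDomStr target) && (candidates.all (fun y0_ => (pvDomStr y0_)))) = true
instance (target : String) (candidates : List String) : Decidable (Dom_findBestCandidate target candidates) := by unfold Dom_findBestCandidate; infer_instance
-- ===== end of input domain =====

-- B replaces A's per-candidate descending slice-comparison scan by a single KMP
-- failure-function pass over candidate + NUL + target (objective: alternative algorithm).


-- ===== PORT A =====
def strandsAreNotEmpty (strand1 strand2 : String) : Bool :=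
  if PySem.Str.len strand1 > 0 ∧ PySem.Str.len strand2 > 0 then true else false

def strandsAreEqualLengths (strand1 strand2 : String) : Bool :=
  if PySem.Str.len strand1 = PySem.Str.len strand2 then true else false

def candidateOverlapsTarget (target candidate : String) (overlap : Int) : Bool :=
  PySem.Str.slice target (some (-overlap)) none == PySem.Str.slice candidate none (some overlap)

def floGo (target candidate : String) : List Int → Int
  | [] => 0
  | i :: rest =>
      let tarslice := PySem.Str.slice target (some i) none
      let _canslice := PySem.Str.slice candidate none (some (PySem.Str.len tarslice))
      if candidateOverlapsTarget target candidate (PySem.Str.len tarslice) then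
        PySem.Str.len tarslice
      else floGo target candidate rest

def findLargestOverlap (target candidate : String) : Int :=
  if strandsAreEqualLengths target candidate ≠ true ∨ strandsAreNotEmpty target candidate ≠ true then
    -1
  else floGo target candidate (PySem.List.pyRange 0 (PySem.Str.len target) 1)

def findBestCandidate (target : String) (candidates : List String) : String × Int :=
  candidates.foldl
    (fun best candidate =>
      let overlap := findLargestOverlap target candidate
      if overlap > best.2 then (candidate, overlap) else best)
    ("", 0)

-- ===== PORT B =====
def kmpInner (s : List Char) (f : List Nat) (a : Char) : Nat → Nat → Nat
  | 0, _ => 0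
  | fuel + 1, k =>
      if k ≠ 0 ∧ s.getD k '?' ≠ a then kmpInner s f a fuel (f.getD (k - 1) 0) else k

def kmpStep (s : List Char) (f : List Nat) (a : Char) (k : Nat) : Nat :=
  if s.getD (kmpInner s f a (k + 1) k) '?' = a then kmpInner s f a (k + 1) k + 1
  else kmpInner s f a (k + 1) k

def kmpLoop (s : List Char) (f : List Nat) (k i : Nat) : Nat :=
  if i < s.length then
    kmpLoop s (f ++ [kmpStep s f (s.getD i '?') k]) (kmpStep s f (s.getD i '?') k) (i + 1)
  else k
  termination_by s.length - i

def largestOverlapKMP (target candidate : String) : Int :=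
  if PySem.Str.len candidate ≠ PySem.Str.len target ∨ target = "" then -1
  else ((kmpLoop (candidate.toList ++ Char.ofNat 0 :: target.toList) [0] 0 1 : Nat) : Int)

def findBestCandidate_alt (target : String) (candidates : List String) : String × Int :=
  candidates.foldl
    (fun best candidate =>
      let overlap := largestOverlapKMP target candidate
      if overlap > best.2 then (candidate, overlap) else best)
    ("", 0)

-- ===== PRECONDITION & SPEC =====
def Spec_findBestCandidate (target : String) (candidates : List String) (out : String × Int) : Prop := out = findBestCandidate_alt target candidates
instance (target : String) (candidates : List String) (out : String × Int) : Decidable (Spec_findBestCandidate target candidates out) := by unfold Spec_findBestCandidate; infer_instance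

-- ===== CLAIM (what is proved, stated in full; the proofs are below) =====
def Claim_equal_findBestCandidate : Prop := ∀ (target : String) (candidates : List String), Dom_findBestCandidate target candidates → Spec_findBestCandidate target candidates (findBestCandidate target candidates)

-- ===== LEMMAS AND PROOFS =====

lemma fg_eq {P : Nat → Prop} [DecidablePred P] {n v : Nat} (hvn : v ≤ n)
    (hv : P v ∨ v = 0) (hmax : ∀ k, P k → k ≤ n → k ≤ v) : Nat.findGreatest P n = v := by
  rcases hv with hPv | rfl
  · exact Nat.le_antisymm (hmax _ (Nat.findGreatest_spec hvn hPv) (Nat.findGreatest_le n))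
      (Nat.le_findGreatest hvn hPv)
  · rw [Nat.findGreatest_eq_zero_iff]
    intro k hk hkn hPk
    exact absurd (hmax k hPk hkn) (by omega)

lemma fg_congr {P Q : Nat → Prop} [DecidablePred P] [DecidablePred Q] (n : Nat)
    (h : ∀ k, 0 < k → k ≤ n → (P k ↔ Q k)) : Nat.findGreatest P n = Nat.findGreatest Q n := by
  induction n with
  | zero => rfl
  | succ n ih =>
      rw [Nat.findGreatest_succ, Nat.findGreatest_succ,
        ih (fun k hk hkn => h k hk (by omega))]
      by_cases hp : P (n + 1)
      · rw [if_pos hp, if_pos ((h (n+1) (by omega) le_rfl).mp hp)]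
      · rw [if_neg hp, if_neg (fun hq => hp ((h (n+1) (by omega) le_rfl).mpr hq))]

lemma fg_shrink {P : Nat → Prop} [DecidablePred P] (n m : Nat) (hm : m ≤ n)
    (h : ∀ k, P k → k ≤ m) : Nat.findGreatest P n = Nat.findGreatest P m := by
  induction n with
  | zero => have : m = 0 := by omega
            rw [this]
  | succ n ih =>
      rcases Nat.eq_or_lt_of_le hm with rfl | hlt
      · rfl
      · rw [Nat.findGreatest_succ, if_neg (fun hp => absurd (h _ hp) (by omega)),
          ih (by omega)]

abbrev IsBrd (s : List Char) (k : Nat) : Prop := k < s.length ∧ s.take k = s.drop (s.length - k)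

lemma isBrd_zero {s : List Char} (hs : s ≠ []) : IsBrd s 0 := by
  constructor
  · exact List.length_pos_iff.mpr hs
  · simp

lemma isBrd_succ (p : List Char) (a : Char) (k : Nat) :
    IsBrd (p ++ [a]) (k + 1) ↔ IsBrd p k ∧ p.getD k '?' = a := by
  by_cases hk : k < p.length
  · have h1 : (p ++ [a]).take (k + 1) = p.take k ++ [p.getD k '?'] := by
      rw [List.take_append_of_le_length (by omega), List.take_succ,
        List.getElem?_eq_getElem hk]
      simp [List.getD_eq_getElem?_getD, List.getElem?_eq_getElem hk]
    have h2 : (p ++ [a]).drop ((p ++ [a]).length - (k + 1)) = p.drop (p.length - k) ++ [a] := by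
      have hidx : (p ++ [a]).length - (k + 1) = p.length - k := by
        simp only [List.length_append, List.length_cons, List.length_nil]
        omega
      rw [hidx, List.drop_append_of_le_length (by omega)]
    constructor
    · rintro ⟨-, heq⟩
      rw [h1, h2] at heq
      have hlen : (p.take k).length = (p.drop (p.length - k)).length := by
        simp; omega
      have := List.append_inj heq (by simpa using by omega)
      exact ⟨⟨hk, this.1⟩, by
        have := this.2
        simp only [List.cons.injEq, and_true] at this
        exact this⟩
    · rintro ⟨⟨-, heq⟩, hga⟩
      refine ⟨by simp; omega, ?_⟩
      rw [h1, h2, heq, hga]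
  · constructor
    · rintro ⟨hlt, -⟩
      simp at hlt
      omega
    · rintro ⟨⟨hlt, -⟩, -⟩
      omega

lemma isBrd_nest {s : List Char} {j k : Nat} (hj : IsBrd s j) (hk : IsBrd s k) (hjk : j < k) :
    IsBrd (s.take k) j := by
  obtain ⟨hkl, hke⟩ := hk
  obtain ⟨hjl, hje⟩ := hj
  refine ⟨by simp; omega, ?_⟩
  have hL : (s.take k).take j = s.take j := by
    rw [List.take_take]; congr 1; omega
  have hR : (s.take k).drop ((s.take k).length - j) = s.take j := by
    have hlen : (s.take k).length = k := by simp; omega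
    rw [hlen, hke, List.drop_drop]
    rw [show s.length - k + (k - j) = s.length - j by omega, ← hje]
  rw [hL, hR]

lemma isBrd_trans {s : List Char} {c b : Nat} (hc : IsBrd s c) (hb : IsBrd (s.take c) b) :
    IsBrd s b := by
  obtain ⟨hcl, hce⟩ := hc
  obtain ⟨hbl, hbe⟩ := hb
  have hlen : (s.take c).length = c := by simp; omega
  rw [hlen] at hbl hbe
  refine ⟨by omega, ?_⟩
  have hL : s.take b = (s.take c).take b := by
    rw [List.take_take]; congr 1; omega
  rw [hL, hbe, hce, List.drop_drop]
  congr 1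
  omega

abbrev MBrd (s : List Char) : Nat := Nat.findGreatest (IsBrd s) s.length

abbrev NewK (p : List Char) (a : Char) : Nat :=
  Nat.findGreatest (fun k => 0 < k ∧ IsBrd p (k - 1) ∧ p.getD (k - 1) '?' = a) p.length

lemma fg_pos_spec {P : Nat → Prop} [DecidablePred P] {n : Nat}
    (h : Nat.findGreatest P n ≠ 0) : P (Nat.findGreatest P n) :=
  ((Nat.findGreatest_eq_iff.mp rfl).2.1) h

lemma brd_append_max (p : List Char) (a : Char) :
    MBrd (p ++ [a]) = NewK p a := by
  apply fg_eq
  · exact le_trans (Nat.findGreatest_le p.length) (by simp)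
  · rcases Nat.eq_zero_or_pos (NewK p a) with h0 | hpos
    · right; exact h0
    · left
      obtain ⟨hq0, hqb, hqm⟩ := fg_pos_spec (P := fun k => 0 < k ∧ IsBrd p (k - 1) ∧ p.getD (k - 1) '?' = a) (Nat.pos_iff_ne_zero.mp hpos)
      have := (isBrd_succ p a (NewK p a - 1)).mpr ⟨hqb, hqm⟩
      rwa [Nat.sub_add_cancel hq0] at this
  · intro k hPk hkn
    match k with
    | 0 => exact Nat.zero_le _
    | j + 1 =>
        obtain ⟨hbrd, hmatch⟩ := (isBrd_succ p a j).mp hPk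
        exact Nat.le_findGreatest hbrd.1 ⟨by omega, by simpa using hbrd, by simpa using hmatch⟩

def KInv (s : List Char) (f : List Nat) (i : Nat) : Prop :=
  f.length = i ∧ ∀ j, j < i → f.getD j 0 = MBrd (s.take (j + 1))

lemma getD_take_of_lt {s : List Char} {i k : Nat} (h : k < i) (d : Char) :
    (s.take i).getD k d = s.getD k d := by
  rw [List.getD_eq_getElem?_getD, List.getD_eq_getElem?_getD, List.getElem?_take, if_pos h]

lemma mbrd_lt {s : List Char} {c : Nat} (h : 0 < c) (hc : c ≤ s.length) :
    MBrd (s.take c) < c := by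
  have hb : MBrd (s.take c) ≤ (s.take c).length := Nat.findGreatest_le _
  have hlen : (s.take c).length = c := by simp; omega
  by_contra hge
  have hMBne : MBrd (s.take c) ≠ 0 := by omega
  have hP : IsBrd (s.take c) (MBrd (s.take c)) := fg_pos_spec hMBne
  have h2 : MBrd (s.take c) < (s.take c).length := hP.1
  omega

lemma step_spec (s : List Char) (f : List Nat) (i : Nat) (hi1 : 1 ≤ i) (hilen : i < s.length)
    (hf : KInv s f i) :
    ∀ fuel c, c < fuel → (IsBrd (s.take i) c ∨ c = 0) →
      (∀ j, c < j → IsBrd (s.take i) j → (s.take i).getD j '?' ≠ s.getD i '?') →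
      (if s.getD (kmpInner s f (s.getD i '?') fuel c) '?' = s.getD i '?'
        then kmpInner s f (s.getD i '?') fuel c + 1
        else kmpInner s f (s.getD i '?') fuel c) = NewK (s.take i) (s.getD i '?') := by
  intro fuel
  induction fuel with
  | zero => intro c hc; omega
  | succ m ih =>
      intro c hcf hc hmax
      set p := s.take i with hp
      set a := s.getD i '?' with ha
      have hplen : p.length = i := by simp [hp]; omega
      have hpne : p ≠ [] := by
        intro h0; rw [h0] at hplen; simp at hplen; omega
      have hci : c < i := by
        rcases hc with hbrd | rfl
        · have := hbrd.1; omega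
        · omega
      have hgc : p.getD c '?' = s.getD c '?' := getD_take_of_lt hci '?'
      by_cases hcond : c ≠ 0 ∧ s.getD c '?' ≠ a
      · -- recurse
        have hc0 : c ≠ 0 := hcond.1
        have hbrdc : IsBrd p c := by
          rcases hc with hbrd | rfl
          · exact hbrd
          · omega
        have hfc : f.getD (c - 1) 0 = MBrd (s.take c) := by
          have := hf.2 (c - 1) (by omega)
          rwa [Nat.sub_add_cancel (by omega)] at this
        set c2 := f.getD (c - 1) 0 with hc2def
        have hc2 : c2 = MBrd (s.take c) := hfc
        have hc2lt : c2 < c := by rw [hc2]; exact mbrd_lt (by omega) (by omega)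
        have htakec : (s.take c).take c = s.take c := by simp
        have hptc : p.take c = s.take c := by rw [hp, List.take_take]; congr 1; omega
        have hstep : kmpInner s f a (m + 1) c = kmpInner s f a m c2 := by
          rw [kmpInner, if_pos hcond]
        have h1 : c2 < m := by omega
        have h2 : IsBrd p c2 ∨ c2 = 0 := by
          rcases Nat.eq_zero_or_pos c2 with h0 | hpos
          · right; exact h0
          · left
            have hc2ne : c2 ≠ 0 := by omega
            have hb2 : IsBrd (s.take c) c2 := by
              rw [hc2]
              refine fg_pos_spec ?_
              show MBrd (s.take c) ≠ 0
              omega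
            rw [← hptc] at hb2
            exact isBrd_trans hbrdc hb2
        have h3 : ∀ j, c2 < j → IsBrd p j → p.getD j '?' ≠ a := by
          intro j hj hbrdj
          rcases Nat.lt_trichotomy j c with hlt | rfl | hgt
          · -- c2 < j < c : j would be a border of s.take c larger than its MBrd
            exfalso
            have hnest : IsBrd (p.take c) j := isBrd_nest hbrdj hbrdc hlt
            rw [hptc] at hnest
            have hle : j ≤ MBrd (s.take c) :=
              Nat.le_findGreatest (by have := hnest.1; simp at this; omega) hnest
            omega
          · rw [hgc]; exact hcond.2
          · exact hmax j hgt hbrdj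
        rw [hstep]
        exact ih c2 h1 h2 h3
      · -- exit the while loop with k = c
        have hinner : kmpInner s f a (m + 1) c = c := by
          rw [kmpInner, if_neg hcond]
        simp only [hinner]
        push_neg at hcond
        by_cases hmatch : s.getD c '?' = a
        · rw [if_pos hmatch]
          have hbrdc : IsBrd p c := by
            rcases hc with hbrd | rfl
            · exact hbrd
            · exact isBrd_zero hpne
          refine Eq.symm ?_
          apply fg_eq
          · omega
          · left
            refine ⟨by omega, by simpa using hbrdc, ?_⟩
            simpa using hgc.trans hmatch
          · intro k hPk hkn
            obtain ⟨hk0, hkb, hkm⟩ := hPk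
            by_contra hgtc
            exact hmax (k - 1) (by omega) hkb (by rw [getD_take_of_lt (by have := hkb.1; omega) '?'] at hkm ⊢; rw [hkm])
        · -- c = 0 and no match at 0
          have hc0 : c = 0 := by
            by_contra h
            exact hmatch (by tauto)
          rw [if_neg hmatch, hc0]
          refine Eq.symm ?_
          apply fg_eq (v := 0) (Nat.zero_le _) (Or.inr rfl)
          intro k hPk hkn
          obtain ⟨hk0, hkb, hkm⟩ := hPk
          exfalso
          rcases Nat.eq_zero_or_pos (k - 1) with h1 | h1
          · rw [h1] at hkm
            rw [getD_take_of_lt (by omega) '?'] at hkm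
            rw [hc0] at hmatch
            exact hmatch hkm
          · exact hmax (k - 1) (by omega) hkb hkm

lemma mbrd_take_one (s : List Char) : MBrd (s.take 1) = 0 := by
  apply fg_eq (Nat.zero_le _) (Or.inr rfl)
  intro k hPk hkn
  have h1 := hPk.1
  have h2 : (s.take 1).length ≤ 1 := by simp
  omega

lemma loop_spec (s : List Char) :
    ∀ n f k i, n = s.length - i → 1 ≤ i → i ≤ s.length → KInv s f i →
      k = MBrd (s.take i) → kmpLoop s f k i = MBrd s := by
  intro n
  induction n with
  | zero =>
      intro f k i hn hi1 hile hinv hk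
      have hnl : ¬ i < s.length := by omega
      rw [kmpLoop, if_neg hnl, hk]
      have : i = s.length := by omega
      rw [this, List.take_length]
  | succ n ih =>
      intro f k i hn hi1 hile hinv hk
      have hlt : i < s.length := by omega
      rw [kmpLoop, if_pos hlt]
      have hstep : kmpStep s f (s.getD i '?') k = NewK (s.take i) (s.getD i '?') := by
        rw [kmpStep]
        apply step_spec s f i hi1 hlt hinv (k + 1) k (by omega)
        · rcases Nat.eq_zero_or_pos k with h0 | hpos
          · right; exact h0
          · left
            rw [hk]
            exact fg_pos_spec (show MBrd (s.take i) ≠ 0 by omega)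
        · intro j hj hbrd
          exfalso
          have hle : j ≤ MBrd (s.take i) := Nat.le_findGreatest (le_of_lt hbrd.1) hbrd
          omega
      have htake : s.take (i + 1) = s.take i ++ [s.getD i '?'] := by
        rw [List.take_succ, List.getElem?_eq_getElem hlt]
        simp [List.getD_eq_getElem?_getD, List.getElem?_eq_getElem hlt]
      have hnew : kmpStep s f (s.getD i '?') k = MBrd (s.take (i + 1)) := by
        rw [hstep, ← brd_append_max, ← htake]
      have hfl : f.length = i := hinv.1
      apply ih (f ++ [kmpStep s f (s.getD i '?') k]) _ (i + 1) (by omega) (by omega) (by omega) ?_ hnew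
      constructor
      · simp [hfl]
      · intro j hjlt
        rcases Nat.lt_or_ge j i with hji | hji
        · rw [List.getD_append _ _ _ _ (by omega)]
          exact hinv.2 j hji
        · have hj : j = i := by omega
          subst hj
          rw [List.getD_eq_getElem?_getD, List.getElem?_append_right (by omega),
            show j - f.length = 0 from by omega]
          simpa using hnew

lemma kmp_run (s : List Char) (hs : 1 ≤ s.length) : kmpLoop s [0] 0 1 = MBrd s := by
  apply loop_spec s (s.length - 1) [0] 0 1 rfl (le_refl _) hs
  · constructor
    · rfl
    · intro j hj
      have : j = 0 := by omega
      rw [this, mbrd_take_one]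
      rfl
  · exact (mbrd_take_one s).symm

abbrev QOv (t c : List Char) (k : Nat) : Prop := t.drop (t.length - k) = c.take k

lemma brd_le_n {c t : List Char} {n : Nat} (hc : c.length = n) (ht : t.length = n)
    (hst : Char.ofNat 0 ∉ t) {k : Nat}
    (hk : IsBrd (c ++ Char.ofNat 0 :: t) k) : k ≤ n := by
  set s := c ++ Char.ofNat 0 :: t with hs
  have hslen : s.length = 2 * n + 1 := by simp [hs, hc, ht]; omega
  by_contra hgt
  have hklen : k < s.length := hk.1
  have heq := hk.2
  have h1 : (s.take k)[n]? = some (Char.ofNat 0) := by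
    rw [List.getElem?_take, if_pos (by omega), hs, List.getElem?_append_right (by omega),
      show n - c.length = 0 from by omega]
    rfl
  have h2 : (s.drop (s.length - k))[n]? = t[2 * n - k]? := by
    rw [List.getElem?_drop, hs, List.getElem?_append_right (by omega),
      show s.length - k + n - c.length = 2 * n - k + 1 from by omega,
      List.getElem?_cons_succ]
  rw [heq, h2] at h1
  exact hst (List.mem_of_getElem? h1)

lemma sep_take_drop {c t : List Char} {n k : Nat} (hc : c.length = n) (ht : t.length = n)
    (hk1 : 1 ≤ k) (hkn : k ≤ n) :
    (c ++ Char.ofNat 0 :: t).take k = c.take k ∧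
    (c ++ Char.ofNat 0 :: t).drop ((c ++ Char.ofNat 0 :: t).length - k) = t.drop (n - k) := by
  constructor
  · exact List.take_append_of_le_length (by omega)
  · have hlen : (c ++ Char.ofNat 0 :: t).length = 2 * n + 1 := by simp [hc, ht]; omega
    rw [List.drop_append, hlen,
      show 2 * n + 1 - k - c.length = (n - k) + 1 from by omega,
      List.drop_succ_cons, List.drop_eq_nil_of_le (by omega)]
    rfl

lemma mbrd_sep {c t : List Char} {n : Nat} (hc : c.length = n) (ht : t.length = n)
    (hst : Char.ofNat 0 ∉ t) :
    MBrd (c ++ Char.ofNat 0 :: t) = Nat.findGreatest (QOv t c) n := by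
  have hslen : (c ++ Char.ofNat 0 :: t).length = 2 * n + 1 := by simp [hc, ht]; omega
  have h1 : MBrd (c ++ Char.ofNat 0 :: t)
      = Nat.findGreatest (IsBrd (c ++ Char.ofNat 0 :: t)) n :=
    fg_shrink _ n (by omega) (fun k hk => brd_le_n hc ht hst hk)
  rw [h1]
  apply fg_congr
  intro k hk0 hkn
  obtain ⟨htake, hdrop⟩ := sep_take_drop hc ht hk0 hkn
  constructor
  · rintro ⟨-, heq⟩
    rw [htake, hdrop] at heq
    show t.drop (t.length - k) = c.take k
    rw [ht]
    exact heq.symm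
  · intro hq
    have hq' : t.drop (t.length - k) = c.take k := hq
    rw [ht] at hq'
    exact ⟨by omega, by rw [htake, hdrop]; exact hq'.symm⟩

lemma cot_iff (t c : String) (k : Nat) (hk1 : 1 ≤ k) :
    (candidateOverlapsTarget t c (k : Int) = true)
      ↔ QOv t.toList c.toList k := by
  unfold candidateOverlapsTarget
  rw [beq_iff_eq]
  constructor
  · intro h
    have h' := congrArg String.toList h
    rw [PySem.Str.toList_slice, PySem.Str.toList_slice, PySem.Chars.slice_eq_listSlice,
      PySem.Chars.slice_eq_listSlice, show -(k : Int) = -((k : Nat) : Int) from rfl,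
      PySem.List.slice_from_neg_natCast _ _ (by omega),
      PySem.List.slice_to_natCast] at h'
    exact h'
  · intro h
    apply String.ext
    rw [PySem.Str.toList_slice, PySem.Str.toList_slice, PySem.Chars.slice_eq_listSlice,
      PySem.Chars.slice_eq_listSlice,
      PySem.List.slice_from_neg_natCast _ _ (by omega),
      PySem.List.slice_to_natCast]
    exact h

lemma floGo_spec (t c : String) (n : Nat) (ht : t.toList.length = n) :
    ∀ m, m ≤ n → floGo t c (PySem.List.pyRange ((n : Int) - (m : Int)) (n : Int) 1)
      = ((Nat.findGreatest (QOv t.toList c.toList) m : Nat) : Int) := by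
  intro m
  induction m with
  | zero =>
      intro _
      rw [show ((n : Int) - (0 : Nat) = (n : Int)) from by push_cast; ring]
      have hnil : PySem.List.pyRange (n : Int) (n : Int) 1 = [] := by
        simp [PySem.List.pyRange]
      rw [hnil]
      rfl
  | succ m ih =>
      intro hm
      have hlt : (n : Int) - ((m + 1 : Nat) : Int) < (n : Int) := by push_cast; omega
      rw [PySem.List.pyRange_one_cons hlt]
      show (let tarslice := PySem.Str.slice t (some ((n : Int) - ((m + 1 : Nat) : Int))) none;
        let _canslice := PySem.Str.slice c none (some (PySem.Str.len tarslice));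
        if candidateOverlapsTarget t c (PySem.Str.len tarslice) then
          PySem.Str.len tarslice
        else floGo t c (PySem.List.pyRange ((n : Int) - ((m + 1 : Nat) : Int) + 1) (n : Int) 1)) = _
      have hcast : ((n : Int) - ((m + 1 : Nat) : Int)) = ((n - (m + 1) : Nat) : Int) := by
        push_cast; omega
      have hts : (PySem.Str.slice t (some ((n : Int) - ((m + 1 : Nat) : Int))) none).toList
          = t.toList.drop (n - (m + 1)) := by
        rw [hcast, PySem.Str.toList_slice, PySem.Chars.slice_eq_listSlice,
          PySem.List.slice_from_natCast]
      have htlen : PySem.Str.len (PySem.Str.slice t (some ((n : Int) - ((m + 1 : Nat) : Int))) none)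
          = ((m + 1 : Nat) : Int) := by
        rw [PySem.Str.len_eq, hts, List.length_drop, ht]
        congr 1
        omega
      simp only [htlen]
      rw [Nat.findGreatest_succ]
      by_cases hq : QOv t.toList c.toList (m + 1)
      · rw [if_pos ((cot_iff t c (m + 1) (by omega)).mpr hq), if_pos hq]
      · rw [if_neg (fun hcc => hq ((cot_iff t c (m + 1) (by omega)).mp hcc)), if_neg hq,
          show (n : Int) - ((m + 1 : Nat) : Int) + 1 = (n : Int) - ((m : Nat) : Int) from by push_cast; ring]
        exact ih (by omega)

lemma eqlen_iff (t c : String) : strandsAreEqualLengths t c = true ↔ PySem.Str.len t = PySem.Str.len c := by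
  unfold strandsAreEqualLengths
  split_ifs with h
  · exact iff_of_true rfl h
  · exact iff_of_false (by simp) h

lemma notempty_iff (t c : String) : strandsAreNotEmpty t c = true ↔ 0 < PySem.Str.len t ∧ 0 < PySem.Str.len c := by
  unfold strandsAreNotEmpty
  split_ifs with h
  · exact iff_of_true rfl h
  · exact iff_of_false (by simp) h

lemma len_pos_iff (t : String) : 0 < PySem.Str.len t ↔ t ≠ "" := by
  rw [PySem.Str.len_eq]
  constructor
  · intro h he
    subst he
    simp at h
  · intro h
    have : t.toList ≠ [] := fun hl => h (String.ext (by simp [hl]))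
    have := List.length_pos_iff.mpr this
    exact_mod_cast this

lemma overlap_eq (t c : String) (hst : Char.ofNat 0 ∉ t.toList) :
    findLargestOverlap t c = largestOverlapKMP t c := by
  unfold findLargestOverlap largestOverlapKMP
  by_cases hguard : PySem.Str.len c ≠ PySem.Str.len t ∨ t = ""
  · rw [if_pos hguard, if_pos ?_]
    rcases hguard with hne | hemp
    · left
      intro h
      exact hne ((eqlen_iff t c).mp h).symm
    · right
      intro h
      exact ((len_pos_iff t).mp ((notempty_iff t c).mp h).1) hemp
  · push_neg at hguard
    obtain ⟨hlen, htne⟩ := hguard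
    have hcpos : 0 < PySem.Str.len c := by
      rw [hlen]
      exact (len_pos_iff t).mpr htne
    have h1 : strandsAreEqualLengths t c = true := (eqlen_iff t c).mpr hlen.symm
    have h2 : strandsAreNotEmpty t c = true :=
      (notempty_iff t c).mpr ⟨(len_pos_iff t).mpr htne, hcpos⟩
    have hApos : ¬ (strandsAreEqualLengths t c ≠ true ∨ strandsAreNotEmpty t c ≠ true) := by
      push_neg
      exact ⟨h1, h2⟩
    rw [if_neg hApos, if_neg (by push_neg; exact ⟨hlen, htne⟩)]
    set n := t.toList.length with hn
    have hclen : c.toList.length = n := by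
      have := hlen
      rw [PySem.Str.len_eq, PySem.Str.len_eq] at this
      exact_mod_cast this
    have hkmp : kmpLoop (c.toList ++ Char.ofNat 0 :: t.toList) [0] 0 1
        = MBrd (c.toList ++ Char.ofNat 0 :: t.toList) :=
      kmp_run _ (by simp only [List.length_append, List.length_cons]; omega)
    rw [hkmp, mbrd_sep hclen rfl hst]
    have hfg := floGo_spec t c n rfl n (le_refl n)
    rw [show ((n : Int) - (n : Int)) = 0 from by ring] at hfg
    rw [PySem.Str.len_eq]
    exact hfg

lemma dom_no_nul {s : String} (h : pvDomStr s = true) : Char.ofNat 0 ∉ s.toList := by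
  intro hmem
  have h' : s.toList.all pvDomChar = true := h
  have hc := List.all_eq_true.mp h' _ hmem
  have hfalse : pvDomChar (Char.ofNat 0) = false := by decide
  rw [hfalse] at hc
  exact Bool.false_ne_true hc

-- ===== VERDICT (by name: the statement is the Claim_ definition above) =====
theorem findBestCandidate_spec : Claim_equal_findBestCandidate := by
  intro target candidates hdom
  unfold Spec_findBestCandidate findBestCandidate findBestCandidate_alt
  have hd : pvDomStr target = true ∧ ∀ c ∈ candidates, pvDomStr c = true := by
    unfold Dom_findBestCandidate at hdom
    simp only [Bool.and_eq_true, List.all_eq_true] at hdom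
    exact ⟨hdom.1, fun c hc => hdom.2 c hc⟩
  apply PySem.List.foldl_congr_mem
  intro acc x hx
  rw [overlap_eq target x (dom_no_nul hd.1)]
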